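-- pv_equiv track=rewrite | github.com/syntax-and-solder/AoC2025 | Day6/aoc06.py | parse_visual_columns
-- ===== SOURCE A (Python) =====
-- from typing import List, Tuple
--
-- def parse_visual_columns(lines: List[str],
--                          keep_leading: bool = True,
--                          keep_trailing: bool = False) -> List[List[str]]:
--     """
--     Parse visual columns from aligned text lines.
--     - keep_leading: keep spaces that precede a token (leading spaces inside the column).
--     - keep_trailing: keep spaces that follow a token (trailing spaces inside the column).
--     Returns rows of tokens (slices from the original lines).
--     """
--     rows = [ln.rstrip('\n') for ln in lines if ln != '']
--     if not rows:
--         return []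
--
--     maxlen = max(len(r) for r in rows)
--     padded = [r.ljust(maxlen) for r in rows]
--
--     # separator positions: True if every row has a space at that column
--     sep_mask = [all(row[i] == ' ' for row in padded) for i in range(maxlen)]
--
--     # collapse contiguous True runs into separator intervals
--     sep_ranges: List[Tuple[int,int]] = []
--     i = 0
--     while i < maxlen:
--         if sep_mask[i]:
--             start = i
--             while i < maxlen and sep_mask[i]:
--                 i += 1
--             sep_ranges.append((start, i - 1))
--         else:
--             i += 1
--
--     # build slice intervals between separators
--     slices: List[Tuple[int,int]] = []
--     prev = 0
--     for s, e in sep_ranges: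
--         if prev <= s - 1:
--             slices.append((prev, s))   # end exclusive
--         prev = e + 1
--     if prev < maxlen:
--         slices.append((prev, maxlen))
--
--     # extract tokens per row with requested whitespace preservation
--     result: List[List[str]] = []
--     for row in padded:
--         tokens = []
--         for a, b in slices:
--             tok = row[a:b]
--             if not keep_leading:
--                 tok = tok.lstrip()
--             if not keep_trailing:
--                 tok = tok.rstrip()
--             tokens.append(tok)
--         result.append(tokens)
--
--     return result
-- ===== SOURCE B (Python) =====
-- from typing import List
--
-- def parse_visual_columns(lines: List[str],
--                          keep_leading: bool = True,
--                          keep_trailing: bool = False) -> List[List[str]]: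
--     """Column-major single pass: per-row buffers are flushed whenever an
--     all-space column ends a token run; no separator/slice interval lists."""
--     rows = [ln.rstrip('\n') for ln in lines if ln != '']
--     if not rows:
--         return []
--
--     maxlen = max(map(len, rows))
--     padded = [r.ljust(maxlen) for r in rows]
--
--     # column separator mask by folding the rows together
--     mask = [True] * maxlen
--     for p in padded:
--         mask = [m and c == ' ' for m, c in zip(mask, p)]
--
--     def finish(buf: str) -> str:
--         if not keep_leading:
--             buf = buf.lstrip()
--         if not keep_trailing:
--             buf = buf.rstrip()
--         return buf
--
--     result: List[List[str]] = []
--     for p in padded: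
--         toks: List[str] = []
--         buf = None
--         for ch, sep in zip(p, mask):
--             if sep:
--                 if buf is not None:
--                     toks.append(finish(buf))
--                     buf = None
--             else:
--                 buf = (buf if buf is not None else '') + ch
--         if buf is not None:
--             toks.append(finish(buf))
--         result.append(toks)
--     return result
-- ===== Notes on version B (the rewrite author's own statement) =====
-- stated objective: alternative
-- what changed: A computes separator-column runs as index intervals, converts them to slice intervals, then slices every row per interval; B never builds interval lists: it folds the rows into a column separator mask and does one column-major sweep per row with an in-progress token buffer that is flushed at separator columns.
import Mathlib
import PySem

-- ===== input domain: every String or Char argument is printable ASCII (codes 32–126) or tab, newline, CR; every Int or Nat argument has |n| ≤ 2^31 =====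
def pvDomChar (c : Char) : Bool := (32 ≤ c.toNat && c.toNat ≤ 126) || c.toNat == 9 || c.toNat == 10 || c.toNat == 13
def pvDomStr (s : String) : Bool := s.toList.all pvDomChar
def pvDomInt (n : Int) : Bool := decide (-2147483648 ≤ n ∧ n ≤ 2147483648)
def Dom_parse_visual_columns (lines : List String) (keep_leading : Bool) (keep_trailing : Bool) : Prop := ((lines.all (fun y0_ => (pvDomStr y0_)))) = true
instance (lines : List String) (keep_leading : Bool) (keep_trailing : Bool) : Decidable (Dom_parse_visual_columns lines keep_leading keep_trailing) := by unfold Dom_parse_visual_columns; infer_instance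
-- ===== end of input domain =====

-- B replaces A's three-pass interval bookkeeping (separator ranges -> slice intervals -> per-row
-- slicing) by a single column-major sweep with per-row token buffers; objective: alternative
-- decomposition, same observable behaviour.

-- ===== PORT A =====
-- ln.rstrip('\n')  (exact: strips only '\n' characters from the right; both Pythons share this line)
def pvRstripNl (cs : List Char) : List Char := ((cs.reverse).dropWhile (fun c => c == '\n')).reverse

-- inner `while i < maxlen and sep_mask[i]: i += 1`, returning the final i
def pvA_sepScan (mask : List Bool) (maxlen i : Nat) : Nat :=
  if _h : i < maxlen then
    if PySem.List.pyGetD mask (i : Int) false then pvA_sepScan mask maxlen (i + 1) else i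
  else i
termination_by maxlen - i

-- needed by pvA_sepRanges for termination
theorem pvA_sepScan_ge (mask : List Bool) (maxlen i : Nat) : i ≤ pvA_sepScan mask maxlen i := by
  unfold pvA_sepScan
  split
  · split
    · have := pvA_sepScan_ge mask maxlen (i + 1); omega
    · exact le_rfl
  · exact le_rfl
termination_by maxlen - i

theorem pvA_sepScan_gt (mask : List Bool) (maxlen i : Nat) (h : i < maxlen)
    (hm : PySem.List.pyGetD mask (i : Int) false = true) : i < pvA_sepScan mask maxlen i := by
  unfold pvA_sepScan
  rw [dif_pos h, if_pos hm]
  have := pvA_sepScan_ge mask maxlen (i + 1); omega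

-- outer while loop collecting (start, end-inclusive) separator runs
def pvA_sepRanges (mask : List Bool) (maxlen i : Nat) : List (Nat × Nat) :=
  if h : i < maxlen then
    if hm : PySem.List.pyGetD mask (i : Int) false then
      let j := pvA_sepScan mask maxlen i
      (i, j - 1) :: pvA_sepRanges mask maxlen j
    else pvA_sepRanges mask maxlen (i + 1)
  else []
termination_by maxlen - i
decreasing_by
  · have := pvA_sepScan_gt mask maxlen i h hm; omega
  · omega

-- `slices` built from the separator ranges with the running `prev`
def pvA_slices (ranges : List (Nat × Nat)) (prev maxlen : Nat) : List (Nat × Nat) :=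
  match ranges with
  | [] => if prev < maxlen then [(prev, maxlen)] else []
  | (s, e) :: rest =>
    if (prev : Int) ≤ (s : Int) - 1 then (prev, s) :: pvA_slices rest (e + 1) maxlen
    else pvA_slices rest (e + 1) maxlen

def pvA_token (keep_leading keep_trailing : Bool) (row : List Char) (ab : Nat × Nat) : String :=
  let tok := PySem.List.slice row (some (ab.1 : Int)) (some (ab.2 : Int))
  let tok := if !keep_leading then PySem.Chars.lstrip tok else tok
  let tok := if !keep_trailing then PySem.Chars.rstrip tok else tok
  String.ofList tok

def parse_visual_columns (lines : List String) (keep_leading : Bool) (keep_trailing : Bool) : List (List String) :=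
  let rows := (lines.filter (fun ln => ln != "")).map (fun ln => pvRstripNl ln.toList)
  if rows = [] then []
  else
    let maxlen := (rows.map List.length).foldl Nat.max 0
    let padded := rows.map (fun r => r ++ List.replicate (maxlen - r.length) ' ')
    let mask := (List.range maxlen).map (fun i : Nat => padded.all (fun row => PySem.List.pyGetD row (i : Int) ' ' == ' '))
    let slices := pvA_slices (pvA_sepRanges mask maxlen 0) 0 maxlen
    padded.map (fun row => slices.map (pvA_token keep_leading keep_trailing row))

-- ===== PORT B =====
def pvB_finish (keep_leading keep_trailing : Bool) (buf : List Char) : String :=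
  let b := if !keep_leading then PySem.Chars.lstrip buf else buf
  let b := if !keep_trailing then PySem.Chars.rstrip b else b
  String.ofList b

-- one column step of the per-row buffer machine
def pvB_step (kl kt : Bool) (st : List String × Option (List Char)) (cb : Char × Bool) :
    List String × Option (List Char) :=
  if cb.2 then
    match st.2 with
    | some b => (st.1 ++ [pvB_finish kl kt b], none)
    | none => st
  else (st.1, some ((st.2.getD []) ++ [cb.1]))

def pvB_rowTokens (kl kt : Bool) (pairs : List (Char × Bool)) : List String :=
  let st := pairs.foldl (pvB_step kl kt) ([], none)
  match st.2 with
  | some b => st.1 ++ [pvB_finish kl kt b]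
  | none => st.1

def parse_visual_columns_alt (lines : List String) (keep_leading : Bool) (keep_trailing : Bool) : List (List String) :=
  let rows := (lines.filter (fun ln => ln != "")).map (fun ln => pvRstripNl ln.toList)
  if rows = [] then []
  else
    let maxlen := (rows.map List.length).foldl Nat.max 0
    let padded := rows.map (fun r => r ++ List.replicate (maxlen - r.length) ' ')
    let mask := padded.foldl (fun m p => (m.zip p).map (fun bc => bc.1 && (bc.2 == ' ')))
      (List.replicate maxlen true)
    padded.map (fun p => pvB_rowTokens keep_leading keep_trailing (p.zip mask))

-- ===== PRECONDITION & SPEC =====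
def Spec_parse_visual_columns (lines : List String) (keep_leading : Bool) (keep_trailing : Bool) (out : List (List String)) : Prop := out = parse_visual_columns_alt lines keep_leading keep_trailing
instance (lines : List String) (keep_leading : Bool) (keep_trailing : Bool) (out : List (List String)) : Decidable (Spec_parse_visual_columns lines keep_leading keep_trailing out) := by unfold Spec_parse_visual_columns; infer_instance

-- ===== CLAIM (what is proved, stated in full; the proofs are below) =====
def Claim_equal_parse_visual_columns : Prop := ∀ (lines : List String) (keep_leading : Bool) (keep_trailing : Bool), Dom_parse_visual_columns lines keep_leading keep_trailing → Spec_parse_visual_columns lines keep_leading keep_trailing (parse_visual_columns lines keep_leading keep_trailing)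

-- ===== LEMMAS AND PROOFS =====

-- normal form of the token decomposition: maximal non-separator runs of a (char, sep) list
mutual
def pvRuns : List (Char × Bool) → List (List Char)
  | [] => []
  | (c, s) :: rest => if s then pvRuns rest else pvRunsB [c] rest
def pvRunsB (b : List Char) : List (Char × Bool) → List (List Char)
  | [] => [b]
  | (c, s) :: rest => if s then b :: pvRuns rest else pvRunsB (b ++ [c]) rest
end

-- normal form of A's slice intervals: structural over the mask with an offset
mutual
def pvSlicesFrom : List Bool → Nat → List (Nat × Nat)
  | [], _ => []
  | true :: rest, off => pvSlicesFrom rest (off + 1)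
  | false :: rest, off => pvSlicesOpen rest off (off + 1)
def pvSlicesOpen : List Bool → Nat → Nat → List (Nat × Nat)
  | [], start, off => [(start, off)]
  | true :: rest, start, off => (start, off) :: pvSlicesFrom rest (off + 1)
  | false :: rest, start, off => pvSlicesOpen rest start (off + 1)
end

-- the trailing flush of pvB_rowTokens, as a function (pvB_rowTokens = pvFlush ∘ fold, by rfl)
def pvFlush (kl kt : Bool) (st : List String × Option (List Char)) : List String :=
  match st.2 with
  | some b => st.1 ++ [pvB_finish kl kt b]
  | none => st.1

theorem pvRuns_cons_false (c : Char) (ps : List (Char × Bool)) :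
    pvRuns ((c, false) :: ps) = pvRunsB [c] ps := by simp [pvRuns]
theorem pvRuns_cons_true (c : Char) (ps : List (Char × Bool)) :
    pvRuns ((c, true) :: ps) = pvRuns ps := by simp [pvRuns]
theorem pvRunsB_cons_false (b : List Char) (c : Char) (ps : List (Char × Bool)) :
    pvRunsB b ((c, false) :: ps) = pvRunsB (b ++ [c]) ps := by simp [pvRunsB]
theorem pvRunsB_cons_true (b : List Char) (c : Char) (ps : List (Char × Bool)) :
    pvRunsB b ((c, true) :: ps) = b :: pvRuns ps := by simp [pvRunsB]
theorem pvSlicesFrom_cons_false (rest : List Bool) (off : Nat) :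
    pvSlicesFrom (false :: rest) off = pvSlicesOpen rest off (off + 1) := by simp [pvSlicesFrom]
theorem pvSlicesFrom_cons_true (rest : List Bool) (off : Nat) :
    pvSlicesFrom (true :: rest) off = pvSlicesFrom rest (off + 1) := by simp [pvSlicesFrom]
theorem pvSlicesOpen_cons_false (rest : List Bool) (start off : Nat) :
    pvSlicesOpen (false :: rest) start off = pvSlicesOpen rest start (off + 1) := by
  simp [pvSlicesOpen]
theorem pvSlicesOpen_cons_true (rest : List Bool) (start off : Nat) :
    pvSlicesOpen (true :: rest) start off = (start, off) :: pvSlicesFrom rest (off + 1) := by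
  simp [pvSlicesOpen]

theorem pv_init_le_foldl_max (l : List Nat) : ∀ b : Nat, b ≤ l.foldl Nat.max b := by
  induction l with
  | nil => intro b; simp
  | cons x l ih =>
    intro b
    calc b ≤ Nat.max b x := Nat.le_max_left _ _
    _ ≤ (x :: l).foldl Nat.max b := by simpa using ih (Nat.max b x)

theorem pv_length_takeWhile_le {α : Type} (p : α → Bool) (l : List α) :
    (l.takeWhile p).length ≤ l.length := by
  induction l with
  | nil => simp
  | cons x l ih =>
    rw [List.takeWhile_cons]
    split <;> simp <;> omega

theorem pv_le_foldl_max (l : List Nat) (b a : Nat) (h : a ∈ l) : a ≤ l.foldl Nat.max b := by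
  induction l generalizing b with
  | nil => cases h
  | cons x l ih =>
    rcases List.mem_cons.1 h with h' | h'
    · subst h'
      have h2 := pv_init_le_foldl_max l (Nat.max b a)
      have h3 := le_trans (Nat.le_max_right b a) h2
      simpa using h3
    · simpa using ih (Nat.max b x) h' 

theorem pv_dropWhile_eq_drop {α : Type} (p : α → Bool) (l : List α) :
    l.dropWhile p = l.drop (l.takeWhile p).length := by
  have h : l.drop (l.takeWhile p).length
      = ((l.takeWhile p) ++ (l.dropWhile p)).drop (l.takeWhile p).length := by
    rw [List.takeWhile_append_dropWhile]
  rw [h, List.drop_left]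

-- B's row-fold mask equals the "all rows have a space in column i" mask
theorem pv_mask_fold (ps : List (List Char)) (acc : List Bool)
    (h : ∀ p ∈ ps, p.length = acc.length) :
    ps.foldl (fun m p => (m.zip p).map (fun bc => bc.1 && (bc.2 == ' '))) acc
      = (List.range acc.length).map
          (fun i => acc.getD i false && ps.all (fun p => PySem.List.pyGetD p (i : Int) ' ' == ' ')) := by
  induction ps generalizing acc with
  | nil =>
    simp only [List.foldl_nil, List.all_nil, Bool.and_true]
    apply List.ext_getElem
    · simp
    · intro i h1 h2
      simp [List.getD_eq_getElem?_getD, h1]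
  | cons p ps ih =>
    have hp : p.length = acc.length := h p (List.mem_cons_self ..)
    have hlen : ((acc.zip p).map (fun bc => bc.1 && (bc.2 == ' '))).length = acc.length := by
      simp [List.length_zip, hp]
    rw [List.foldl_cons, ih _ (by intro q hq; rw [hlen]; exact h q (List.mem_cons_of_mem _ hq)), hlen]
    apply List.ext_getElem
    · simp
    · intro i h1 h2
      simp only [List.getElem_map, List.getElem_range]
      have hi : i < acc.length := by simpa using h1
      have hip : i < p.length := by omega
      rw [List.getD_eq_getElem _ _ (by simpa [List.length_zip, hp] using hi),
          List.getD_eq_getElem _ _ hi]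
      simp only [List.getElem_map, List.getElem_zip, List.all_cons]
      rw [PySem.List.pyGetD_natCast, List.getD_eq_getElem _ _ hip]
      simp [Bool.and_assoc]

-- the inner while loop scans exactly the separator run starting at i
theorem pv_sepScan_eq (mask : List Bool) (i : Nat) (h : i ≤ mask.length) :
    pvA_sepScan mask mask.length i = i + ((mask.drop i).takeWhile (fun b => b)).length := by
  unfold pvA_sepScan
  by_cases hi : i < mask.length
  · rw [dif_pos hi, List.drop_eq_getElem_cons hi]
    rw [PySem.List.pyGetD_natCast, List.getD_eq_getElem _ _ hi]
    cases hm : mask[i] with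
    | true =>
      rw [if_pos rfl, pv_sepScan_eq mask (i + 1) (by omega)]
      simp
      omega
    | false =>
      rw [if_neg (by simp)]
      simp
  · rw [dif_neg hi]
    have : i = mask.length := by omega
    subst this
    simp
termination_by mask.length - i

theorem pv_sepScan_le (mask : List Bool) (i : Nat) (h : i ≤ mask.length) :
    pvA_sepScan mask mask.length i ≤ mask.length := by
  rw [pv_sepScan_eq mask i h]
  have h1 := pv_length_takeWhile_le (fun b => b) (mask.drop i)
  have h2 : (mask.drop i).length = mask.length - i := List.length_drop ..
  omega

-- skipping a separator run leaves pvSlicesFrom unchanged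
theorem pv_from_skip (m : List Bool) (off : Nat) :
    pvSlicesFrom m off
      = pvSlicesFrom (m.dropWhile (fun b => b)) (off + (m.takeWhile (fun b => b)).length) := by
  induction m generalizing off with
  | nil => simp [pvSlicesFrom]
  | cons s rest ih =>
    cases s
    · simp [pvSlicesFrom]
    · rw [pvSlicesFrom_cons_true, ih (off + 1)]
      have ht : (true :: rest).takeWhile (fun b => b) = true :: rest.takeWhile (fun b => b) := by
        simp
      have hd : (true :: rest).dropWhile (fun b => b) = rest.dropWhile (fun b => b) := by
        simp
      rw [ht, hd]
      congr 1
      simp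
      omega

-- A's range/slice bookkeeping equals the structural slice decomposition
theorem pv_slices_eq (mask : List Bool) (i prev : Nat) (hi : i ≤ mask.length) (hp : prev ≤ i) :
    pvA_slices (pvA_sepRanges mask mask.length i) prev mask.length
      = if prev < i then pvSlicesOpen (mask.drop i) prev i else pvSlicesFrom (mask.drop i) i := by
  unfold pvA_sepRanges
  by_cases hlt : i < mask.length
  · rw [dif_pos hlt]
    have hg : PySem.List.pyGetD mask (i : Int) false = mask[i] := by
      rw [PySem.List.pyGetD_natCast, List.getD_eq_getElem _ _ hlt]
    rw [List.drop_eq_getElem_cons hlt]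
    cases hm : mask[i] with
    | false =>
      rw [dif_neg (by rw [hg, hm]; simp)]
      rw [pv_slices_eq mask (i + 1) prev (by omega) (by omega)]
      rcases Nat.lt_or_ge prev i with hcase | hcase
      · rw [if_pos (by omega), if_pos hcase, pvSlicesOpen_cons_false]
      · have hpe : prev = i := by omega
        rw [hpe, if_pos (by omega), if_neg (by omega), pvSlicesFrom_cons_false]
    | true =>
      rw [dif_pos (by rw [hg, hm])]
      simp only []
      set j := pvA_sepScan mask mask.length i with hj
      have hj1 : i < j := pvA_sepScan_gt mask mask.length i hlt (by rw [hg, hm])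
      have hj2 : j ≤ mask.length := pv_sepScan_le mask i (by omega)
      have hjeq : j = i + 1 + ((mask.drop (i + 1)).takeWhile (fun b => b)).length := by
        rw [hj, pv_sepScan_eq mask i (by omega), List.drop_eq_getElem_cons hlt, hm]
        simp
        omega
      have hdropj : (mask.drop (i + 1)).dropWhile (fun b => b) = mask.drop j := by
        rw [pv_dropWhile_eq_drop, List.drop_drop]
        congr 1
        omega
      simp only [pvA_slices]
      have hrec : pvA_slices (pvA_sepRanges mask mask.length j) (j - 1 + 1) mask.length
          = pvSlicesFrom (mask.drop j) j := by
        have : j - 1 + 1 = j := by omega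
        rw [this, pv_slices_eq mask j j hj2 le_rfl, if_neg (by omega)]
      rcases Nat.lt_or_ge prev i with hcase | hcase
      · rw [if_pos (by omega), if_pos (by omega)]
        rw [hrec, pvSlicesOpen_cons_true,
          pv_from_skip (mask.drop (i + 1)) (i + 1), hdropj, ← hjeq]
      · have hpe : prev = i := by omega
        rw [hpe, if_neg (by omega), if_neg (by omega)]
        rw [hrec, pvSlicesFrom_cons_true,
          pv_from_skip (mask.drop (i + 1)) (i + 1), hdropj, ← hjeq]
  · rw [dif_neg hlt]
    have : i = mask.length := by omega
    subst this
    simp only [pvA_slices, List.drop_length]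
    rcases Nat.lt_or_ge prev mask.length with hcase | hcase
    · rw [if_pos hcase, if_pos hcase]
      simp [pvSlicesOpen]
    · have hpe : prev = mask.length := by omega
      rw [hpe, if_neg (by omega), if_neg (by omega)]
      simp [pvSlicesFrom]
termination_by mask.length - i

-- a completed column interval produces the same token either way
theorem pv_token_eq (kl kt : Bool) (row : List Char) (start off : Nat) :
    pvA_token kl kt row (start, off) = pvB_finish kl kt ((row.drop start).take (off - start)) := by
  simp [pvA_token, pvB_finish, PySem.List.slice_natCast]

-- slice-interval extraction = structural runs of the (char, sep) columns
theorem pv_extract_eq (kl kt : Bool) (row : List Char) (m : List Bool) :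
    ∀ (off start : Nat), off + m.length = row.length → start ≤ off →
      ((pvSlicesFrom m off).map (pvA_token kl kt row)
          = (pvRuns ((row.drop off).zip m)).map (pvB_finish kl kt))
      ∧ ((pvSlicesOpen m start off).map (pvA_token kl kt row)
          = (pvRunsB ((row.drop start).take (off - start)) ((row.drop off).zip m)).map
              (pvB_finish kl kt)) := by
  induction m with
  | nil =>
    intro off start hlen hs
    constructor
    · simp [pvSlicesFrom, pvRuns]
    · simp only [pvSlicesOpen, List.zip_nil_right, pvRunsB, List.map_cons, List.map_nil]
      rw [pv_token_eq]
  | cons s rest ih =>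
    intro off start hlen hs
    have hoff : off < row.length := by simp at hlen; omega
    have hdrop : row.drop off = row[off] :: row.drop (off + 1) := List.drop_eq_getElem_cons hoff
    have hlen' : off + 1 + rest.length = row.length := by simp at hlen; omega
    have hzip : (row.drop off).zip (s :: rest)
        = (row[off], s) :: ((row.drop (off + 1)).zip rest) := by
      rw [hdrop, List.zip_cons_cons]
    have htake1 : (row.drop off).take 1 = [row[off]] := by
      rw [hdrop]
      rfl
    constructor
    · cases s
      · -- false: a token starts here
        rw [pvSlicesFrom_cons_false, hzip, pvRuns_cons_false]
        have h2 := (ih (off + 1) off hlen' (by omega)).2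
        rw [h2]
        congr 2
        rw [Nat.add_sub_cancel_left, htake1]
      · -- true: separator column
        rw [pvSlicesFrom_cons_true, hzip, pvRuns_cons_true]
        exact (ih (off + 1) (off + 1) hlen' le_rfl).1
    · cases s
      · -- false: token continues
        rw [pvSlicesOpen_cons_false, hzip, pvRunsB_cons_false]
        have h2 := (ih (off + 1) start hlen' (by omega)).2
        rw [h2]
        congr 2
        have hk : off + 1 - start = (off - start) + 1 := by omega
        rw [hk, List.take_add_one]
        congr 1
        have hklen : off - start < (row.drop start).length := by
          rw [List.length_drop]
          omega
        rw [List.getElem?_eq_getElem hklen]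
        simp only [List.getElem_drop, Option.toList_some]
        congr 2
        omega
      · -- true: flush the open token
        rw [pvSlicesOpen_cons_true, hzip, pvRunsB_cons_true, List.map_cons, List.map_cons,
          pv_token_eq]
        congr 1
        exact (ih (off + 1) (off + 1) hlen' le_rfl).1

-- B's fold with buffer computes map finish over the structural runs
theorem pv_fold_eq (kl kt : Bool) (pairs : List (Char × Bool)) :
    (∀ toks, pvFlush kl kt (pairs.foldl (pvB_step kl kt) (toks, none))
        = toks ++ (pvRuns pairs).map (pvB_finish kl kt))
    ∧ (∀ toks b, pvFlush kl kt (pairs.foldl (pvB_step kl kt) (toks, some b))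
        = toks ++ (pvRunsB b pairs).map (pvB_finish kl kt)) := by
  induction pairs with
  | nil => constructor <;> simp [pvFlush, pvRuns, pvRunsB]
  | cons cb rest ih =>
    obtain ⟨c, s⟩ := cb
    cases s
    · constructor
      · intro toks
        rw [List.foldl_cons]
        have hstep : pvB_step kl kt (toks, none) (c, false) = (toks, some [c]) := by
          simp [pvB_step]
        rw [hstep, ih.2 toks [c]]
        simp [pvRuns]
      · intro toks b
        rw [List.foldl_cons]
        have hstep : pvB_step kl kt (toks, some b) (c, false) = (toks, some (b ++ [c])) := by
          simp [pvB_step]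
        rw [hstep, ih.2 toks (b ++ [c])]
        simp [pvRunsB]
    · constructor
      · intro toks
        rw [List.foldl_cons]
        have hstep : pvB_step kl kt (toks, none) (c, true) = (toks, none) := by
          simp [pvB_step]
        rw [hstep, ih.1 toks]
        simp [pvRuns]
      · intro toks b
        rw [List.foldl_cons]
        have hstep : pvB_step kl kt (toks, some b) (c, true)
            = (toks ++ [pvB_finish kl kt b], none) := by
          simp [pvB_step]
        rw [hstep, ih.1 (toks ++ [pvB_finish kl kt b])]
        simp [pvRunsB]

theorem pv_rowTokens_eq (kl kt : Bool) (pairs : List (Char × Bool)) :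
    pvB_rowTokens kl kt pairs = (pvRuns pairs).map (pvB_finish kl kt) := by
  have h : pvB_rowTokens kl kt pairs
      = pvFlush kl kt (pairs.foldl (pvB_step kl kt) ([], none)) := rfl
  rw [h, (pv_fold_eq kl kt pairs).1 []]
  simp

-- ===== VERDICT (by name: the statement is the Claim_ definition above) =====
theorem parse_visual_columns_spec : Claim_equal_parse_visual_columns := by
  intro lines kl kt _
  unfold Spec_parse_visual_columns parse_visual_columns parse_visual_columns_alt
  set rows := (lines.filter (fun ln => ln != "")).map (fun ln => pvRstripNl ln.toList) with hrows
  by_cases hr : rows = []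
  · simp [hr]
  · rw [if_neg hr, if_neg hr]
    simp only []
    set maxlen := (rows.map List.length).foldl Nat.max 0 with hml
    set padded := rows.map (fun r => r ++ List.replicate (maxlen - r.length) ' ') with hpad
    have hplen : ∀ p ∈ padded, p.length = maxlen := by
      intro p hp
      rw [hpad] at hp
      obtain ⟨r, hr', rfl⟩ := List.mem_map.1 hp
      have hle : r.length ≤ maxlen := by
        rw [hml]
        exact pv_le_foldl_max _ 0 _ (List.mem_map_of_mem hr')
      simp
      omega
    have hmask : padded.foldl (fun m p => (m.zip p).map (fun bc => bc.1 && (bc.2 == ' ')))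
          (List.replicate maxlen true)
        = (List.range maxlen).map
            (fun i : Nat => padded.all (fun row => PySem.List.pyGetD row (i : Int) ' ' == ' ')) := by
      rw [pv_mask_fold padded _ (by intro p hp; simpa using hplen p hp)]
      simp only [List.length_replicate]
      apply List.map_congr_left
      intro i hi
      rw [List.getD_eq_getElem _ _ (by simpa using List.mem_range.1 hi)]
      simp
    rw [hmask]
    set mask := (List.range maxlen).map
        (fun i : Nat => padded.all (fun row => PySem.List.pyGetD row (i : Int) ' ' == ' ')) with hmaskdef
    have hmlen : mask.length = maxlen := by
      rw [hmaskdef]; simp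
    apply List.map_congr_left
    intro row hrow
    have hrlen : row.length = maxlen := hplen row hrow
    have h1 : pvA_slices (pvA_sepRanges mask maxlen 0) 0 maxlen = pvSlicesFrom mask 0 := by
      rw [← hmlen, pv_slices_eq mask 0 0 (by omega) le_rfl, if_neg (by omega), List.drop_zero]
    have h2 := (pv_extract_eq kl kt row mask 0 0 (by omega) le_rfl).1
    rw [List.drop_zero] at h2
    rw [h1, h2, pv_rowTokens_eq]
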